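-- pv_equiv track=rewrite | github.com/ThinkLabWC/Algorithm | Week01/cheonkyu/140108.py | check_split_str
-- ===== SOURCE A (Python) =====
-- def check_split_str(str):
--     start = str[0]
--     check = []
--     for i in range(0, len(str)):
--         before = check[i-1] if i > 0 else 0
--         if str[i] == start:
--             check.append(before + 1)
--         else:
--             check.append(before - 1)
--         if check[i] == 0:
--             start = str[min(i+1, len(str) - 1)]
--     return check
-- ===== SOURCE B (Python) =====
-- def check_split_str(str):
--     # Staged segment decomposition: for each segment, first find its length m as
--     # the smallest k with 2*count(start char in the first k chars) == k (no running
--     # balance carried), then emit each entry by the closed form 2*prefix_count - position,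
--     # and continue on the remaining suffix.
--     out = []
--     rest = str
--     while rest:
--         n = len(rest)
--         start = rest[0]
--         m = next((k for k in range(1, n + 1) if 2 * rest.count(start, 0, k) == k), n)
--         out.extend(2 * rest.count(start, 0, j) - j for j in range(1, m + 1))
--         rest = rest[m:]
--     return out
-- ===== Notes on version B (the rewrite author's own statement) =====
-- stated objective: alternative
-- what changed: Replaces A's single indexed loop carrying a running balance read back from check[i-1] with a staged segment decomposition: per segment, the length is found as the smallest k with 2*count(start char in first k chars) == k, each entry is computed independently by the closed form 2*prefix_count - position, and the suffix is processed next; no running balance is carried.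
import Mathlib
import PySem

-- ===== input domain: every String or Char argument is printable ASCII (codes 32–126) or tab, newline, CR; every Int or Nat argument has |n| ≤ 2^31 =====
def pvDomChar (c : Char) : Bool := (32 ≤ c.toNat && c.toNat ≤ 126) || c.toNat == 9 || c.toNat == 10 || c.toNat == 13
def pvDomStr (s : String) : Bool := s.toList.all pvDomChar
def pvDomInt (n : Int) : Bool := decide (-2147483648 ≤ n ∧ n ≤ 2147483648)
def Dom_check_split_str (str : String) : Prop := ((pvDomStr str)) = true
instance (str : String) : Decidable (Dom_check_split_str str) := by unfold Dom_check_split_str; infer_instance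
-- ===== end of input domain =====

-- B replaces A's flat running-balance loop by a staged segment decomposition: segment length
-- found as the first k with 2*prefix_count = k, entries emitted by the closed form
-- 2*prefix_count - position (objective: alternative; B is quadratic, not faster).

-- ===== PORT A =====
-- loop body of A's for-loop, as a helper (state = (start, check), i = loop index)
def stepA (cs : List Char) (st : Char × List Int) (i : Int) : Char × List Int :=
  let n : Int := cs.length
  let before : Int := if 0 < i then PySem.List.pyGetD st.2 (i - 1) 0 else 0
  let check := st.2 ++ [if PySem.List.pyGetD cs i ' ' == st.1 then before + 1 else before - 1]
  let start := if PySem.List.pyGetD check i 0 == 0 then PySem.List.pyGetD cs (min (i + 1) (n - 1)) st.1 else st.1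
  (start, check)

def check_split_str (str : String) : List Int :=
  let cs := str.toList
  -- str[0]: Pre_ excludes "", where Python raises IndexError; the default char is never read under Pre_,
  -- and all other indexings of A are in range, so pyGetD is exact here
  let start0 := PySem.List.pyGetD cs 0 ' '
  ((PySem.List.pyRange 0 (cs.length : Int) 1).foldl (stepA cs) (start0, [])).2

-- ===== PORT B =====
-- Source B's closing test `2 * rest.count(start, 0, k) == k`
def pvCloseAt (s : List Char) (c : Char) (k : Nat) : Bool := 2 * (s.take k).count c == k
-- Source B's `m = next((k for k in range(1, n+1) if ...), n)`
def pvSegLen (s : List Char) (c : Char) : Nat :=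
  ((List.range' 1 s.length).find? (pvCloseAt s c)).getD s.length
-- Source B's closed-form entry `2 * rest.count(start, 0, j) - j`
def pvBal (s : List Char) (c : Char) (j : Nat) : Int :=
  2 * (((s.take j).count c : Nat) : Int) - (j : Int)

-- termination of the outer while-loop: a segment is never empty
lemma pvSegLen_pos (s : List Char) (c : Char) (h : s ≠ []) : 1 ≤ pvSegLen s c := by
  unfold pvSegLen
  cases hf : (List.range' 1 s.length).find? (pvCloseAt s c) with
  | none =>
      simp only [Option.getD_none]
      cases s with
      | nil => exact absurd rfl h
      | cons a t => simp
  | some k =>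
      have hk := List.mem_range'_1.mp (List.mem_of_find?_eq_some hf)
      simp only [Option.getD_some]
      omega

-- Source B's outer while-loop over the remaining suffix
def altGo : List Char → List Int
  | [] => []
  | c :: rest =>
      (List.range' 1 (pvSegLen (c :: rest) c)).map (pvBal (c :: rest) c)
        ++ altGo ((c :: rest).drop (pvSegLen (c :: rest) c))
termination_by l => l.length
decreasing_by
  have h1 : 1 ≤ pvSegLen (c :: rest) c := pvSegLen_pos _ _ (by simp)
  simp only [List.length_drop, List.length_cons]
  omega

def check_split_str_alt (str : String) : List Int := altGo str.toList

-- ===== PRECONDITION & SPEC =====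
-- Pre_ excludes only the empty string, on which A raises IndexError at str[0].
def Pre_check_split_str (str : String) : Prop := str ≠ ""
instance (str : String) : Decidable (Pre_check_split_str str) := by unfold Pre_check_split_str; infer_instance
def pvWitness_check_split_str : String := "aab"

def Spec_check_split_str (str : String) (out : List Int) : Prop := out = check_split_str_alt str
instance (str : String) (out : List Int) : Decidable (Spec_check_split_str str out) := by unfold Spec_check_split_str; infer_instance

-- ===== CLAIM (what is proved, stated in full; the proofs are below) =====
def Claim_equal_check_split_str : Prop := ∀ (str : String), Dom_check_split_str str → Pre_check_split_str str → Spec_check_split_str str (check_split_str str)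

-- ===== LEMMAS AND PROOFS =====

-- A's loop, re-expressed as structural recursion over the remaining characters:
-- state = (segment start char, running balance = last appended value, accumulated output).
def loopA (start : Char) (bal : Int) (acc : List Int) : List Char → List Int
  | [] => acc
  | c :: rest =>
      let b := bal + (if c == start then 1 else -1)
      if b == 0 then loopA (rest.headD c) 0 (acc ++ [b]) rest
      else loopA start b (acc ++ [b]) rest

lemma getD_last (l : List Int) (h : l ≠ []) : l.getD (l.length - 1) 0 = l.getLastD 0 := by
  simp [List.getD_eq_getElem?_getD, List.getLastD_eq_getLast?, List.getLast?_eq_getElem?]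

lemma foldA_eq_loopA (cs : List Char) : ∀ (m k : Nat) (start : Char) (check : List Int),
    m = cs.length - k → check.length = k → k ≤ cs.length →
    ((PySem.List.pyRange (k : Int) (cs.length : Int) 1).foldl (stepA cs) (start, check)).2
      = loopA start (check.getLastD 0) check (cs.drop k) := by
  intro m
  induction m with
  | zero =>
    intro k start check hm hk hkle
    have hke : k = cs.length := by omega
    subst hke
    rw [PySem.List.pyRange_one_eq_nil (by omega)]
    simp [loopA]
  | succ m ih =>
    intro k start check hm hk hkle
    have hklt : k < cs.length := by omega
    rw [PySem.List.pyRange_one_cons (by exact_mod_cast hklt)]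
    simp only [List.foldl_cons]
    have hdrop : cs.drop k = cs[k] :: cs.drop (k + 1) := List.drop_eq_getElem_cons hklt
    have hbefore : (if 0 < (k : Int) then PySem.List.pyGetD check ((k : Int) - 1) 0 else 0)
        = check.getLastD 0 := by
      cases k with
      | zero =>
        have : check = [] := List.length_eq_zero_iff.mp hk
        simp [this]
      | succ j =>
        have h1 : ((j + 1 : Nat) : Int) - 1 = ((j : Nat) : Int) := by push_cast; ring
        rw [if_pos (by positivity), h1, PySem.List.pyGetD_natCast]
        have hne : check ≠ [] := by
          intro hc; rw [hc] at hk; simp at hk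
        have : j = check.length - 1 := by omega
        rw [this, getD_last check hne]
    have hcs : PySem.List.pyGetD cs (k : Int) ' ' = cs[k] := by
      rw [PySem.List.pyGetD_natCast]
      simp [List.getD_eq_getElem?_getD, List.getElem?_eq_getElem hklt]
    set b : Int := check.getLastD 0 + (if cs[k] == start then 1 else -1) with hbdef
    have hbval : (if PySem.List.pyGetD cs (k : Int) ' ' == start
        then (if 0 < (k : Int) then PySem.List.pyGetD check ((k : Int) - 1) 0 else 0) + 1
        else (if 0 < (k : Int) then PySem.List.pyGetD check ((k : Int) - 1) 0 else 0) - 1) = b := by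
      rw [hbefore, hcs, hbdef]; split_ifs <;> ring
    have hgetb : PySem.List.pyGetD (check ++ [b]) (k : Int) 0 = b := by
      rw [PySem.List.pyGetD_natCast]
      simp [List.getD_eq_getElem?_getD, hk]
    have hlastb : (check ++ [b]).getLastD 0 = b := by simp
    simp only [stepA, hbval, hgetb]
    rw [hdrop]
    simp only [loopA]
    by_cases hz : b = 0
    · have hzb : (b == 0) = true := beq_iff_eq.mpr hz
      simp only [hzb, if_pos]
      have hstart : PySem.List.pyGetD cs (min ((k : Int) + 1) ((cs.length : Int) - 1)) start
          = (cs.drop (k + 1)).headD cs[k] := by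
        by_cases hk1 : k + 1 < cs.length
        · have hmin : min ((k : Int) + 1) ((cs.length : Int) - 1) = ((k + 1 : Nat) : Int) := by
            push_cast; omega
          rw [hmin, PySem.List.pyGetD_natCast]
          rw [List.drop_eq_getElem_cons hk1]
          simp [List.getD_eq_getElem?_getD, List.getElem?_eq_getElem hk1]
        · have hke : k + 1 = cs.length := by omega
          have hmin : min ((k : Int) + 1) ((cs.length : Int) - 1) = ((k : Nat) : Int) := by
            omega
          rw [hmin, PySem.List.pyGetD_natCast]
          rw [List.drop_of_length_le (by omega)]
          simp [List.getD_eq_getElem?_getD, List.getElem?_eq_getElem hklt]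
      rw [hstart]
      have := ih (k + 1) ((cs.drop (k + 1)).headD cs[k]) (check ++ [b]) (by omega) (by simp [hk]) (by omega)
      rw [hlastb] at this
      have hcast : ((k : Int) + 1) = ((k + 1 : Nat) : Int) := by push_cast; ring
      rw [hcast, this, ← hbdef]
      simp [hz]
    · have hzb : (b == 0) = false := beq_eq_false_iff_ne.mpr hz
      simp only [hzb, Bool.false_eq_true, if_neg, not_false_iff]
      have := ih (k + 1) start (check ++ [b]) (by omega) (by simp [hk]) (by omega)
      rw [hlastb] at this
      have hcast : ((k : Int) + 1) = ((k + 1 : Nat) : Int) := by push_cast; ring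
      rw [hcast, this, ← hbdef, hzb]
      simp

-- ----- B-side characterisation of pvSegLen -----

lemma fr_some : ∀ (n s : Nat) (p : Nat → Bool) (k : Nat),
    (List.range' s n).find? p = some k →
    p k = true ∧ s ≤ k ∧ k < s + n ∧ ∀ j, s ≤ j → j < k → p j = false := by
  intro n
  induction n with
  | zero => intro s p k h; simp [List.range'] at h
  | succ n ih =>
    intro s p k h
    rw [List.range'_succ] at h
    cases hp : p s with
    | true =>
      simp only [List.find?_cons, hp] at h
      injection h with h; subst h
      exact ⟨hp, le_refl _, by omega, fun j h1 h2 => by omega⟩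
    | false =>
      simp only [List.find?_cons, hp] at h
      obtain ⟨h1, h2, h3, h4⟩ := ih (s + 1) p k h
      refine ⟨h1, by omega, by omega, fun j hj1 hj2 => ?_⟩
      by_cases hjs : j = s
      · subst hjs; exact hp
      · exact h4 j (by omega) hj2

lemma noEarlier (s : List Char) (c : Char) (k : Nat) (h1 : 1 ≤ k) (h2 : k < pvSegLen s c) :
    pvCloseAt s c k = false := by
  unfold pvSegLen at h2
  cases hf : (List.range' 1 s.length).find? (pvCloseAt s c) with
  | none =>
    rw [hf, Option.getD_none] at h2
    have := List.find?_eq_none.mp hf k (List.mem_range'_1.mpr ⟨h1, by omega⟩)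
    simpa using this
  | some k0 =>
    rw [hf, Option.getD_some] at h2
    exact (fr_some _ _ _ _ hf).2.2.2 k h1 h2

lemma segLen_le (s : List Char) (c : Char) : pvSegLen s c ≤ s.length := by
  unfold pvSegLen
  cases hf : (List.range' 1 s.length).find? (pvCloseAt s c) with
  | none => simp
  | some k0 =>
    have := (fr_some _ _ _ _ hf).2.2.1
    simp only [Option.getD_some]; omega

lemma close_iff (s : List Char) (c : Char) (j : Nat) :
    pvCloseAt s c j = true ↔ pvBal s c j = 0 := by
  unfold pvCloseAt pvBal
  rw [Nat.beq_eq_true_eq]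
  constructor
  · intro h; omega
  · intro h; omega

lemma pvBal_step (s : List Char) (c : Char) (j : Nat) (hj : j < s.length) :
    pvBal s c (j + 1) = pvBal s c j + (if s[j] == c then 1 else -1) := by
  unfold pvBal
  rw [List.take_succ, List.getElem?_eq_getElem hj]
  simp only [Option.toList_some, List.count_append, List.count_singleton]
  by_cases h : s[j] == c
  · rw [if_pos h]; simp [h]; push_cast; ring
  · rw [if_neg h]
    simp only [h]
    push_cast
    ring

-- inner loop: within a segment of s that starts with char c, at offset j (no close before)
lemma inner : ∀ (fuel : Nat) (s : List Char) (c : Char) (j : Nat) (acc : List Int),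
    s.length - j ≤ fuel → j < pvSegLen s c →
    (∀ (t : List Char) (d : Char) (acc' : List Int), t.length < s.length →
        loopA (t.headD d) 0 acc' t = acc' ++ altGo t) →
    loopA c (pvBal s c j) acc (s.drop j)
      = acc ++ ((List.range' (j + 1) (pvSegLen s c - j)).map (pvBal s c)
            ++ altGo (s.drop (pvSegLen s c))) := by
  intro fuel
  induction fuel with
  | zero =>
    intro s c j acc hfuel hj _
    have := segLen_le s c
    omega
  | succ fuel ih =>
    intro s c j acc hfuel hj hOut
    have hle := segLen_le s c
    have hjlt : j < s.length := by omega
    rw [List.drop_eq_getElem_cons hjlt]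
    simp only [loopA]
    rw [← pvBal_step s c j hjlt]
    by_cases hb : pvBal s c (j + 1) = 0
    · -- segment closes here: pvSegLen = j+1
      have hclose : pvCloseAt s c (j + 1) = true := (close_iff s c (j + 1)).mpr hb
      have hm : pvSegLen s c = j + 1 := by
        by_contra hne
        have : j + 1 < pvSegLen s c := by omega
        rw [noEarlier s c (j + 1) (by omega) this] at hclose
        simp at hclose
      rw [if_pos (beq_iff_eq.mpr hb)]
      have hlen : (s.drop (j + 1)).length < s.length := by
        simp [List.length_drop]; omega
      rw [hOut (s.drop (j + 1)) (s[j]) (acc ++ [pvBal s c (j + 1)]) hlen]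
      rw [hm]
      have : pvSegLen s c - j = 1 := by omega
      rw [hm] at this
      simp [this, List.range', hb]
    · rw [if_neg (by simpa using hb)]
      by_cases hlt : j + 1 < pvSegLen s c
      · rw [ih s c (j + 1) (acc ++ [pvBal s c (j + 1)]) (by omega) hlt hOut]
        have hrange : List.range' (j + 1) (pvSegLen s c - j)
            = (j + 1) :: List.range' (j + 2) (pvSegLen s c - (j + 1)) := by
          have h1 : pvSegLen s c - j = (pvSegLen s c - (j + 1)) + 1 := by omega
          rw [h1, List.range'_succ]
        rw [hrange]
        simp
      · -- j+1 = pvSegLen and not a close point: the find? was none, segment = whole rest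
        have hm : pvSegLen s c = j + 1 := by omega
        have hn : pvSegLen s c = s.length := by
          unfold pvSegLen
          cases hf : (List.range' 1 s.length).find? (pvCloseAt s c) with
          | none => simp
          | some k0 =>
            obtain ⟨hp, _, _, _⟩ := fr_some _ _ _ _ hf
            have hk0 : k0 = j + 1 := by
              have : pvSegLen s c = k0 := by unfold pvSegLen; rw [hf]; rfl
              omega
            rw [hk0, close_iff] at hp
            exact absurd hp hb
        have hjn : j + 1 = s.length := by omega
        rw [List.drop_of_length_le (by omega)]
        simp only [loopA]
        rw [hm, hjn, List.drop_length]
        have h1 : s.length - j = 1 := by omega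
        have haltnil : altGo [] = [] := by rw [altGo]
        rw [h1, haltnil]
        simp [List.range', hjn]

-- outer loop: at a segment start, A's loop equals B's altGo
lemma outer : ∀ (N : Nat) (s : List Char), s.length ≤ N → ∀ (d : Char) (acc : List Int),
    loopA (s.headD d) 0 acc s = acc ++ altGo s := by
  intro N
  induction N with
  | zero =>
    intro s hs d acc
    have : s = [] := List.length_eq_zero_iff.mp (by omega)
    subst this
    simp [loopA]
    rw [altGo]
  | succ N ih =>
    intro s hs d acc
    cases s with
    | nil => simp [loopA]; rw [altGo]
    | cons c rest =>
      simp only [List.headD_cons]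
      have hpos : 1 ≤ pvSegLen (c :: rest) c := pvSegLen_pos _ _ (by simp)
      have h0 : pvBal (c :: rest) c 0 = 0 := by unfold pvBal; simp
      have hinner := inner (c :: rest).length (c :: rest) c 0 acc (by omega) hpos
        (fun t d' acc' ht => ih t (by simp at hs ht ⊢; omega) d' acc')
      rw [h0] at hinner
      simp only [List.drop_zero, Nat.sub_zero] at hinner
      rw [hinner]
      congr 1
      rw [altGo]

-- ===== VERDICT (by name: the statement is the Claim_ definition above) =====
theorem check_split_str_spec : Claim_equal_check_split_str := by
  intro str _ hpre
  unfold Spec_check_split_str check_split_str check_split_str_alt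
  cases hcs : str.toList with
  | nil =>
    exact absurd (String.toList_eq_nil_iff.mp hcs) hpre
  | cons c rest =>
    simp only [PySem.List.pyGetD_zero_cons]
    have hfold := foldA_eq_loopA (c :: rest) (c :: rest).length 0 c [] (by omega) rfl (by omega)
    simp only [Nat.cast_zero, List.drop_zero, List.getLastD_nil] at hfold
    rw [hfold]
    have := outer (c :: rest).length (c :: rest) (le_refl _) ' ' []
    simpa using this
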